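-- pv_equiv track=rewrite | github.com/icecream126/LINCSQA-PBIOAGENT | utils/kg_loader.py | translate_bioplex
-- ===== SOURCE A (Python) =====
-- from collections import defaultdict
-- from typing import Dict, List, Set, Tuple, Any, Optional
--
-- def translate_bioplex(g1: str, rels: List[Tuple]) -> List[str]:
--     """Translate BioPlex relationships to text (from notebook)"""
--     cell_to_g2s = defaultdict(list)
--     for rel in rels:
--         g2, celltype = rel
--         cell_to_g2s[celltype].append(g2)
--     desc = []
--     for celltype, g2s in cell_to_g2s.items():
--         desc.append(f"In {celltype} cells, {g1} may form a complex with {', '.join(g2s)}")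
--     return desc
-- ===== SOURCE B (Python) =====
-- def translate_bioplex(g1, rels):
--     """Single pass: build each description in place, indexed by celltype."""
--     desc = []
--     idx = {}
--     for g2, celltype in rels:
--         i = idx.get(celltype)
--         if i is None:
--             idx[celltype] = len(desc)
--             desc.append(f"In {celltype} cells, {g1} may form a complex with {g2}")
--         else:
--             desc[i] = desc[i] + ", " + g2
--     return desc
-- ===== Notes on version B (the rewrite author's own statement) =====
-- stated objective: simpler
-- what changed: One fused pass that builds each description string in place (a dict maps celltype to its index in the output list, repeats concatenate ', g2' onto that entry), replacing the intermediate celltype->list-of-genes grouping dict and the separate formatting/join loop.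
import Mathlib
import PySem

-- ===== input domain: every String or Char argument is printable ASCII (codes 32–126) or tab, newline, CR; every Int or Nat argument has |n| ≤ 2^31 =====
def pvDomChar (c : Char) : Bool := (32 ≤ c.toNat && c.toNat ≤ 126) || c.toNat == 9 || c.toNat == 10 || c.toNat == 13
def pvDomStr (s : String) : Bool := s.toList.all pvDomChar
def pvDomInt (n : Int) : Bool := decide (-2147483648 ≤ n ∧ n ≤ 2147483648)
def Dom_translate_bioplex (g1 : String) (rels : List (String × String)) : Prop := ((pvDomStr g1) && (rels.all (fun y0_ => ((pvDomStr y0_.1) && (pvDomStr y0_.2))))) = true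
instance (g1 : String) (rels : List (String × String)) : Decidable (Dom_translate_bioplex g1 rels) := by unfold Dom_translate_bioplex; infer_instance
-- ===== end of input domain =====

-- ===== PORT A =====
-- B fuses A's grouping dict and formatting loop into one pass that edits the output strings in place (objective: simpler).
def translate_bioplex (g1 : String) (rels : List (String × String)) : List String :=
  let cell_to_g2s : PySem.Dict String (List String) :=
    rels.foldl (fun d rel => d.modify rel.2 [] (fun gs => gs ++ [rel.1])) PySem.Dict.empty
  cell_to_g2s.items.foldl
    (fun desc it =>
      desc ++ ["In " ++ it.1 ++ " cells, " ++ g1 ++ " may form a complex with " ++ PySem.Str.join ", " it.2]) []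

-- ===== PORT B =====
def tbStep (g1 : String) (st : List String × PySem.Dict String Nat) (rel : String × String) :
    List String × PySem.Dict String Nat :=
  match st.2.get? rel.2 with
  | none   => (st.1 ++ ["In " ++ rel.2 ++ " cells, " ++ g1 ++ " may form a complex with " ++ rel.1],
               st.2.insert rel.2 st.1.length)
  | some i => (st.1.set i ((st.1[i]?.getD "") ++ ", " ++ rel.1), st.2)

def translate_bioplex_alt (g1 : String) (rels : List (String × String)) : List String :=
  (rels.foldl (tbStep g1) ([], PySem.Dict.empty)).1

-- ===== PRECONDITION & SPEC =====
def Spec_translate_bioplex (g1 : String) (rels : List (String × String)) (out : List String) : Prop := out = translate_bioplex_alt g1 rels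
instance (g1 : String) (rels : List (String × String)) (out : List String) : Decidable (Spec_translate_bioplex g1 rels out) := by unfold Spec_translate_bioplex; infer_instance

-- ===== CLAIM (what is proved, stated in full; the proofs are below) =====
def Claim_equal_translate_bioplex : Prop := ∀ (g1 : String) (rels : List (String × String)), Dom_translate_bioplex g1 rels → Spec_translate_bioplex g1 rels (translate_bioplex g1 rels)

-- ===== LEMMAS AND PROOFS =====
def tbFmt (g1 c : String) (gs : List String) : String :=
  "In " ++ c ++ " cells, " ++ g1 ++ " may form a complex with " ++ PySem.Str.join ", " gs

theorem chars_join_snoc (sep p : List Char) (ps : List (List Char)) (h : ps ≠ []) :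
    PySem.Chars.join sep (ps ++ [p]) = PySem.Chars.join sep ps ++ sep ++ p := by
  induction ps with
  | nil => exact absurd rfl h
  | cons q rest ih =>
    cases rest with
    | nil => simp [PySem.Chars.join_cons_cons, PySem.Chars.join_singleton]
    | cons r rest' =>
      have ih' := ih (by simp)
      simp only [List.cons_append] at ih' ⊢
      rw [PySem.Chars.join_cons_cons, ih']
      simp [PySem.Chars.join_cons_cons, List.append_assoc]

theorem str_join_snoc (sep g : String) (gs : List String) (h : gs ≠ []) :
    PySem.Str.join sep (gs ++ [g]) = PySem.Str.join sep gs ++ sep ++ g := by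
  apply String.ext
  simp [PySem.Str.toList_join, chars_join_snoc sep.toList g.toList (gs.map String.toList) (by simpa using h),
    List.append_assoc]

theorem str_join_singleton (sep g : String) : PySem.Str.join sep [g] = g := by
  apply String.ext
  simp [PySem.Str.toList_join, PySem.Chars.join_singleton]

theorem tbFmt_snoc (g1 c g : String) (gs : List String) (h : gs ≠ []) :
    tbFmt g1 c (gs ++ [g]) = tbFmt g1 c gs ++ ", " ++ g := by
  simp [tbFmt, str_join_snoc _ _ _ h, String.append_assoc]

theorem tbFmt_singleton (g1 c g : String) :
    tbFmt g1 c [g] = "In " ++ c ++ " cells, " ++ g1 ++ " may form a complex with " ++ g := by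
  simp [tbFmt, str_join_singleton]

-- setting the idxOf-slot of a mapped Nodup list rewrites exactly that element
theorem map_set_idxOf {K : List String} {x : String} (f f' : String → String) (v : String)
    (hnd : K.Nodup) (hx : x ∈ K) (hv : f' x = v) (hoth : ∀ y, y ≠ x → f' y = f y) :
    (K.map f).set (K.idxOf x) v = K.map f' := by
  have hlt : K.idxOf x < K.length := List.idxOf_lt_length_iff.mpr hx
  apply List.ext_getElem
  · simp
  · intro j hj hj'
    have hjK : j < K.length := by simpa using hj'
    rw [List.getElem_set]
    by_cases hij : K.idxOf x = j
    · subst hij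
      rw [if_pos rfl, List.getElem_map, List.getElem_idxOf hlt, hv]
    · rw [if_neg hij, List.getElem_map, List.getElem_map]
      have : K[j] ≠ x := by
        intro hEq
        apply hij
        have := List.getElem_idxOf hlt (xs := K) (x := x)
        exact hnd.getElem_inj_iff.mp (this.trans hEq.symm)
      rw [hoth _ this]

-- the invariant of B's single pass
theorem tb_loop (g1 : String) (rest : List (String × String)) :
    ∀ (K : List String) (grp : String → List String) (idx : PySem.Dict String Nat),
      idx.keys = K → K.Nodup →
      (∀ c ∈ K, idx.get? c = some (K.idxOf c)) →
      (∀ c ∈ K, grp c ≠ []) → (∀ c, c ∉ K → grp c = []) →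
      (rest.foldl (tbStep g1) (K.map (fun c => tbFmt g1 c (grp c)), idx)).1
        = (PySem.Set.update K (rest.map (·.2))).map
            (fun c => tbFmt g1 c (grp c ++ (rest.filter (fun p => p.2 == c)).map (·.1))) := by
  induction rest with
  | nil =>
    intro K grp idx hkeys hnd hget hne hout
    simp [PySem.Set.update_nil]
  | cons p rest ih =>
    intro K grp idx hkeys hnd hget hne hout
    rw [List.foldl_cons]
    by_cases hc : p.2 ∈ K
    · -- repeated celltype: concatenate onto the existing entry
      have hlt : K.idxOf p.2 < K.length := List.idxOf_lt_length_iff.mpr hc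
      have hstep : tbStep g1 (K.map (fun c => tbFmt g1 c (grp c)), idx) p
          = ((K.map (fun c => tbFmt g1 c (grp c))).set (K.idxOf p.2)
              (tbFmt g1 p.2 (grp p.2) ++ ", " ++ p.1), idx) := by
        simp [tbStep, hget _ hc, List.getElem?_map, List.getElem?_eq_getElem hlt,
          List.getElem_idxOf hlt]
      rw [hstep,
        map_set_idxOf (fun c => tbFmt g1 c (grp c))
          (fun c => tbFmt g1 c (if c = p.2 then grp p.2 ++ [p.1] else grp c)) _ hnd hc
          (by simp [tbFmt_snoc _ _ _ _ (hne _ hc)])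
          (by intro y hy; simp [hy]),
        ih K (fun c => if c = p.2 then grp p.2 ++ [p.1] else grp c) idx hkeys hnd hget
          (by
            intro c hcK
            by_cases h : c = p.2
            · subst h; simp
            · simpa [h] using hne _ hcK)
          (by
            intro c hcK
            have h : c ≠ p.2 := by rintro rfl; exact hcK hc
            simpa [h] using hout _ hcK)]
      have hadd : PySem.Set.add K p.2 = K := by
        simp [PySem.Set.add, hc]
      rw [List.map_cons, PySem.Set.update_cons, hadd]
      apply List.map_congr_left
      intro c _
      by_cases h : c = p.2
      · subst h; simp [List.append_assoc]
      · have : (p.2 == c) = false := by simpa [beq_iff_eq] using Ne.symm h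
        simp [this, h]
    · -- new celltype: append a fresh description and remember its index
      have hnone : idx.get? p.2 = none :=
        (PySem.Dict.get?_eq_none_iff_not_mem_keys idx p.2).mpr (hkeys ▸ hc)
      have hcontains : idx.contains p.2 = false := by
        rw [PySem.Dict.contains_eq_decide_mem_keys, hkeys]
        simpa using hc
      have hstep : tbStep g1 (K.map (fun c => tbFmt g1 c (grp c)), idx) p
          = ((K ++ [p.2]).map (fun c => tbFmt g1 c (if c = p.2 then [p.1] else grp c)),
             idx.insert p.2 K.length) := by
        simp only [tbStep, hnone]
        refine Prod.ext ?_ (by simp)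
        simp only [List.map_append, List.map_cons, List.map_nil]
        congr 1
        · apply List.map_congr_left
          intro c hcK
          have h : c ≠ p.2 := by rintro rfl; exact hc hcK
          simp [h]
        · simp [tbFmt_singleton]
      rw [hstep,
        ih (K ++ [p.2]) (fun c => if c = p.2 then [p.1] else grp c) (idx.insert p.2 K.length)
          (by rw [PySem.Dict.keys_insert_of_not_contains _ _ hcontains, hkeys])
          (by
            simp only [List.nodup_append, List.nodup_singleton, true_and]
            exact ⟨hnd, by simpa using fun a ha (he : a = p.2) => hc (he ▸ ha)⟩)
          (by
            intro c hcK
            rw [PySem.Dict.get?_insert]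
            rcases List.mem_append.mp hcK with hK | hP
            · rw [if_neg (by rintro rfl; exact hc hK), hget _ hK,
                List.idxOf_append_of_mem hK]
            · have : c = p.2 := by simpa using hP
              subst this
              rw [if_pos rfl, List.idxOf_append_of_notMem hc]
              simp)
          (by
            intro c hcK
            by_cases h : c = p.2
            · simp [h]
            · have hK : c ∈ K := by
                rcases List.mem_append.mp hcK with hK | hP
                · exact hK
                · exact absurd (by simpa using hP) h
              simpa [h] using hne _ hK)
          (by
            intro c hcK
            have h : c ≠ p.2 := by rintro rfl; exact hcK (by simp)
            simpa [h] using hout _ (fun hm => hcK (List.mem_append.mpr (Or.inl hm))))]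
      have hadd : PySem.Set.add K p.2 = K ++ [p.2] := by
        simp [PySem.Set.add, hc]
      rw [List.map_cons, PySem.Set.update_cons, hadd]
      apply List.map_congr_left
      intro c _
      by_cases h : c = p.2
      · subst h; simp [hout _ hc]
      · have : (p.2 == c) = false := by simpa [beq_iff_eq] using Ne.symm h
        simp [this, h]

theorem flatMap_singleton_eq_map {α β : Type} (g : α → β) (l : List α) :
    (l.flatMap fun a => [g a]) = l.map g := by
  induction l with
  | nil => rfl
  | cons a l ih => simp [ih]

-- A's value in closed form: first-occurrence celltypes, each with its genes in order
theorem tbA_eq (g1 : String) (rels : List (String × String)) :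
    translate_bioplex g1 rels
      = (PySem.Set.ofList (rels.map (·.2))).map
          (fun c => tbFmt g1 c ((rels.filter (fun p => p.2 == c)).map (·.1))) := by
  unfold translate_bioplex
  have hfold :
      rels.foldl (fun d rel => d.modify rel.2 [] (fun gs => gs ++ [rel.1])) PySem.Dict.empty
        = (rels.map Prod.swap).foldl (fun d p => d.modify p.1 [] (fun gs => gs ++ [p.2]))
            PySem.Dict.empty := by
    rw [List.foldl_map]
    simp only [Prod.fst_swap, Prod.snd_swap]
  have hkeys :
      (rels.foldl (fun d rel => d.modify rel.2 [] (fun gs => gs ++ [rel.1]))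
        PySem.Dict.empty).keys = PySem.Set.update [] (rels.map (·.2)) := by
    have := PySem.Dict.keys_foldl_modify_key rels (fun rel => rel.2) []
      (fun d rel => fun gs => gs ++ [rel.1]) PySem.Dict.empty
    simpa using this
  have hnd :
      (rels.foldl (fun d rel => d.modify rel.2 [] (fun gs => gs ++ [rel.1]))
        PySem.Dict.empty).keys.Nodup := by
    have := PySem.Dict.nodup_keys_foldl_modify_key rels (fun rel => rel.2) []
      (fun d rel => fun gs => gs ++ [rel.1]) PySem.Dict.empty (by simp)
    simpa using this
  rw [PySem.List.foldl_append_eq_flatMap, PySem.Dict.items_eq_map_keys _ hnd []]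
  have hgetD : ∀ c,
      (rels.foldl (fun d rel => d.modify rel.2 [] (fun gs => gs ++ [rel.1]))
        PySem.Dict.empty).getD c []
        = (rels.filter (fun p => p.2 == c)).map (·.1) := by
    intro c
    rw [hfold]
    have := PySem.Dict.getD_foldl_modify_append (rels.map Prod.swap) PySem.Dict.empty c
    rw [this]
    simp [List.filter_map, Function.comp_def, Prod.swap]
  rw [hkeys, PySem.Set.update_nil_left]
  simp only [List.nil_append, List.flatMap_map]
  rw [flatMap_singleton_eq_map]
  apply List.map_congr_left
  intro c _
  simp [tbFmt, hgetD c]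

theorem tbB_eq (g1 : String) (rels : List (String × String)) :
    translate_bioplex_alt g1 rels
      = (PySem.Set.ofList (rels.map (·.2))).map
          (fun c => tbFmt g1 c ((rels.filter (fun p => p.2 == c)).map (·.1))) := by
  unfold translate_bioplex_alt
  have := tb_loop g1 rels [] (fun _ => []) PySem.Dict.empty (by simp) (by simp)
    (by simp) (by simp) (by intro _ _; rfl)
  simpa [PySem.Set.update_nil_left] using this

-- ===== VERDICT (by name: the statement is the Claim_ definition above) =====
theorem translate_bioplex_spec : Claim_equal_translate_bioplex := by
  intro g1 rels _
  unfold Spec_translate_bioplex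
  rw [tbA_eq, tbB_eq]
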